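-- pv_equiv track=rewrite | github.com/jsdavis02/mft_hl7_oasis_components | oasis_fun/clean_pdf_msg.py | clean_pdf_msg
-- ===== SOURCE A (Python) =====
-- def clean_pdf_msg(pdf_json):
--
--     deletekeys = list()
--     for (s, value) in pdf_json.items():
--         if s.startswith('OBX') and pdf_json[s]['2'] == "TX":
--             deletekeys.append(s)
--
--     for s in deletekeys:
--         if s in pdf_json:
--             del pdf_json[s]
--
--     return pdf_json
-- ===== SOURCE B (Python) =====
-- def clean_pdf_msg(pdf_json):
--     # Fixed-point deletion: repeatedly scan for the FIRST OBX key whose segment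
--     # has type TX, delete it, and rescan, until no such key remains.
--     # The input dict is mutated in place, like A, and returned.
--     while True:
--         doomed = next((k for k, v in pdf_json.items()
--                        if k.startswith('OBX') and v['2'] == 'TX'), None)
--         if doomed is None:
--             return pdf_json
--         del pdf_json[doomed]
-- ===== Notes on version B (the rewrite author's own statement) =====
-- stated objective: alternative
-- what changed: A collects all doomed keys in one pass and then deletes them in a second pass; B instead iterates delete-first-match to a fixed point: each round scans only until the first OBX/TX entry, deletes it, and rescans until no match remains.
import Mathlib
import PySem

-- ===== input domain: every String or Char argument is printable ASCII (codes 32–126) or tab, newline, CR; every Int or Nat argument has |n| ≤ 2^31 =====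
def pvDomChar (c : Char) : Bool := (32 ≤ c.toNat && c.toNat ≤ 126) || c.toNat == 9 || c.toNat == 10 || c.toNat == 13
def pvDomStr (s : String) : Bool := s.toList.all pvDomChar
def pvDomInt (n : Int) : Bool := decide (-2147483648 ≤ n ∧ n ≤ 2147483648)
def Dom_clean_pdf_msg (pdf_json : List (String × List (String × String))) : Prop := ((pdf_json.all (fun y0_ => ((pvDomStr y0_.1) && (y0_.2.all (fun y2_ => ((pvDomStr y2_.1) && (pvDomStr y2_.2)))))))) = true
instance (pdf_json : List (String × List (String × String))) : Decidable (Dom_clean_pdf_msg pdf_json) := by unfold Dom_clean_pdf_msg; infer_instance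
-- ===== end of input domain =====

-- B replaces A's collect-then-delete two-pass scheme by a fixed-point loop that
-- repeatedly deletes the first OBX segment of type TX until none remains (alternative).
-- A mutates its dict argument in place and returns it; B performs the same mutation.

-- ===== PORT A =====
-- Literal port of A: first loop collects into deletekeys the OBX keys whose looked-up
-- value has "2" mapped to "TX" (Python raises KeyError when "2" is absent; here getD ""
-- is used — Pre_ excludes exactly those inputs); second loop deletes each collected key
-- after an 'in' check.
def clean_pdf_msg (pdf_json : List (String × List (String × String))) : List (String × List (String × String)) :=
  let d := PySem.Dict.mk pdf_json
  let deletekeys : List String := pdf_json.foldl (fun acc sv =>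
    if PySem.Str.startswith sv.1 "OBX" &&
       (PySem.Dict.getD (PySem.Dict.mk ((PySem.Dict.get? d sv.1).getD [])) "2" "" == "TX")
    then acc ++ [sv.1] else acc) []
  (deletekeys.foldl (fun dd s =>
    if PySem.Dict.contains dd s then PySem.Dict.erase dd s else dd) d).items

-- ===== PORT B =====
-- the per-entry condition "this entry is an OBX segment of type TX"
-- (getD "" stands for Python's v['2'] lookup; Pre_ excludes the KeyError inputs)
def pvCond (kv : String × List (String × String)) : Bool :=
  PySem.Str.startswith kv.1 "OBX" &&
    (PySem.Dict.getD (PySem.Dict.mk kv.2) "2" "" == "TX")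

-- erasing an item found in the dict strictly shrinks it (termination of B's loop)
theorem pvEraseShrinks (d : PySem.Dict String (List (String × String)))
    (kv : String × List (String × String)) (hmem : kv ∈ d.items) :
    (PySem.Dict.erase d kv.1).items.length < d.items.length := by
  simp only [PySem.Dict.erase]
  apply List.length_filter_lt_length_iff_exists.2
  exact ⟨kv, hmem, by simp⟩

-- Port of B's while-loop: find the first OBX/TX entry; if none, stop; else delete it and rescan.
def pvBLoop (d : PySem.Dict String (List (String × String))) :
    PySem.Dict String (List (String × String)) :=
  match hf : d.items.find? pvCond with
  | none => d
  | some kv => pvBLoop (PySem.Dict.erase d kv.1)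
termination_by d.items.length
decreasing_by exact pvEraseShrinks d kv (List.mem_of_find?_eq_some hf)

def clean_pdf_msg_alt (pdf_json : List (String × List (String × String))) : List (String × List (String × String)) :=
  (pvBLoop (PySem.Dict.mk pdf_json)).items

-- ===== PRECONDITION & SPEC =====
-- Pre_ excludes association lists with duplicate keys (outer or in a value), which do not
-- represent a Python dict, and OBX-prefixed entries whose value lacks key "2", on which A
-- raises KeyError.
def Pre_clean_pdf_msg (pdf_json : List (String × List (String × String))) : Prop :=
  (pdf_json.map Prod.fst).Nodup ∧
  ∀ kv ∈ pdf_json, (kv.2.map Prod.fst).Nodup ∧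
    (PySem.Str.startswith kv.1 "OBX" = true →
      PySem.Dict.contains (PySem.Dict.mk kv.2) "2" = true)
instance (pdf_json : List (String × List (String × String))) : Decidable (Pre_clean_pdf_msg pdf_json) := by unfold Pre_clean_pdf_msg; infer_instance

def pvWitness_clean_pdf_msg : (List (String × List (String × String))) :=
  [("OBX1", [("2", "TX"), ("5", "pdf")]), ("MSH", [("1", "|")]), ("OBX2", [("2", "ED")])]

def Spec_clean_pdf_msg (pdf_json : List (String × List (String × String))) (out : List (String × List (String × String))) : Prop := out = clean_pdf_msg_alt pdf_json
instance (pdf_json : List (String × List (String × String))) (out : List (String × List (String × String))) : Decidable (Spec_clean_pdf_msg pdf_json out) := by unfold Spec_clean_pdf_msg; infer_instance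

-- ===== CLAIM (what is proved, stated in full; the proofs are below) =====
def Claim_equal_clean_pdf_msg : Prop := ∀ (pdf_json : List (String × List (String × String))), Dom_clean_pdf_msg pdf_json → Pre_clean_pdf_msg pdf_json → Spec_clean_pdf_msg pdf_json (clean_pdf_msg pdf_json)

-- ===== LEMMAS AND PROOFS =====

-- erase with a contains-guard is just erase
theorem pvEraseGuard {κ ν : Type} [BEq κ] (d : PySem.Dict κ ν) (k : κ) :
    (if PySem.Dict.contains d k then PySem.Dict.erase d k else d) = PySem.Dict.erase d k := by
  by_cases h : PySem.Dict.contains d k = true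
  · simp [h]
  · simp only [Bool.not_eq_true] at h
    simp only [h, if_neg Bool.false_ne_true]
    apply PySem.Dict.ext
    simp only [PySem.Dict.erase]
    refine (List.filter_eq_self.2 ?_).symm
    intro p hp
    simp only [PySem.Dict.contains] at h
    rw [List.any_eq_false] at h
    have := h p hp
    simpa using this

-- folding erase over a key list filters the items by key-not-in-list
theorem pvFoldErase {κ ν : Type} [BEq κ] (ks : List κ) (d : PySem.Dict κ ν) :
    (ks.foldl (fun dd s => if PySem.Dict.contains dd s then PySem.Dict.erase dd s else dd) d).items
      = d.items.filter (fun kv => !(ks.contains kv.1)) := by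
  induction ks generalizing d with
  | nil => simp
  | cons s ks ih =>
      rw [List.foldl_cons, pvEraseGuard, ih]
      simp only [PySem.Dict.erase, List.filter_filter]
      apply List.filter_congr
      intro kv _
      cases h1 : (kv.1 == s) <;> simp [List.contains_cons, h1]

-- B's fixed-point loop computes exactly the pvCond-negative entries (given unique keys)
theorem pvBLoop_items (d : PySem.Dict String (List (String × String)))
    (hnd : d.keys.Nodup) :
    (pvBLoop d).items = d.items.filter (fun kv => !(pvCond kv)) := by
  induction hL : d.items.length using Nat.strong_induction_on generalizing d with
  | _ n ih =>
    rw [pvBLoop]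
    split
    · next hfind =>
        rw [List.find?_eq_none] at hfind
        exact (List.filter_eq_self.2 (fun kv hkv => by simp [hfind kv hkv])).symm
    · next kv hfind =>
        have hmem := List.mem_of_find?_eq_some hfind
        have hcond : pvCond kv = true := List.find?_some hfind
        have hnd' : (PySem.Dict.erase d kv.1).keys.Nodup := by
          simp only [PySem.Dict.keys, PySem.Dict.erase] at hnd ⊢
          exact List.Nodup.sublist (List.filter_sublist.map Prod.fst) hnd
        rw [ih _ (hL ▸ pvEraseShrinks d kv hmem) _ hnd' rfl]
        simp only [PySem.Dict.erase, List.filter_filter]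
        apply List.filter_congr
        intro x hx
        by_cases hc : pvCond x = true
        · simp [hc]
        · simp only [Bool.not_eq_true] at hc
          have hne : (x.1 == kv.1) = false := by
            simp only [beq_eq_false_iff_ne, ne_eq]
            intro heq
            have : x = kv := by
              simp only [PySem.Dict.keys] at hnd
              exact List.inj_on_of_nodup_map hnd hx hmem heq
            rw [this, hcond] at hc
            simp at hc
          simp [hne, hc]

-- ===== VERDICT (by name: the statement is the Claim_ definition above) =====
theorem clean_pdf_msg_spec : Claim_equal_clean_pdf_msg := by
  intro pdf_json _ hpre
  obtain ⟨hnd, _⟩ := hpre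
  unfold Spec_clean_pdf_msg clean_pdf_msg_alt
  rw [pvBLoop_items (PySem.Dict.mk pdf_json) (by simpa [PySem.Dict.keys] using hnd)]
  unfold clean_pdf_msg
  have hkeys : (PySem.Dict.mk pdf_json).keys.Nodup := by
    simpa [PySem.Dict.keys] using hnd
  have hlook : ∀ kv ∈ pdf_json, PySem.Dict.get? (PySem.Dict.mk pdf_json) kv.1 = some kv.2 := by
    intro kv hkv
    exact PySem.Dict.get?_of_mem_items (PySem.Dict.mk pdf_json) (by simpa using hkv) hkeys
  -- A's first loop collects the keys of the pvCond-positive entries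
  have hdel : (pdf_json.foldl (fun acc sv =>
      if PySem.Str.startswith sv.1 "OBX" &&
         (PySem.Dict.getD (PySem.Dict.mk ((PySem.Dict.get? (PySem.Dict.mk pdf_json) sv.1).getD [])) "2" "" == "TX")
      then acc ++ [sv.1] else acc) ([] : List String))
      = (pdf_json.filter pvCond).map Prod.fst := by
    rw [PySem.List.foldl_congr_mem pdf_json _
          (fun acc sv => if pvCond sv = true then acc ++ [sv.1] else acc) []
          (by intro acc sv hsv
              rw [hlook sv hsv]
              rfl)]
    simpa using PySem.List.foldl_append_if pvCond Prod.fst pdf_json []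
  simp only [hdel, pvFoldErase]
  -- a key is collected iff its (unique) entry satisfies pvCond
  apply List.filter_congr
  intro kv hkv
  have hcont : ((pdf_json.filter pvCond).map Prod.fst).contains kv.1 = pvCond kv := by
    by_cases hc : pvCond kv = true
    · rw [hc]
      simp only [List.contains_eq_mem, List.mem_map, decide_eq_true_eq]
      exact ⟨kv, List.mem_filter.2 ⟨hkv, hc⟩, rfl⟩
    · simp only [Bool.not_eq_true] at hc
      rw [hc]
      simp only [List.contains_eq_mem, List.mem_map, decide_eq_false_iff_not]
      rintro ⟨kv', hkv', hfst⟩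
      obtain ⟨hkv'mem, hc'⟩ := List.mem_filter.1 hkv'
      have heq : kv' = kv := List.inj_on_of_nodup_map hnd hkv'mem hkv hfst
      rw [heq, hc] at hc'
      exact Bool.false_ne_true hc'
  rw [hcont]
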